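-- pv_equiv track=rewrite | github.com/vijaymaddukuri/python_repo | training/data_reverse.py | data_reverse
-- ===== SOURCE A (Python) =====
-- def data_reverse(data):
--     l = len(data)
--     s = 0
--     lst = []
--     for i in range(0,l+1,8):
--         if i !=0:
--             temp = data[s:i]
--             lst.append(temp)
--         s=i
--     finalList = []
--     for item in range(len(lst)):
--         temp = lst.pop(-1)
--         finalList.extend(temp)
--     return finalList
-- ===== SOURCE B (Python) =====
-- def data_reverse(data):
--     n = len(data) // 8
--     result = []
--     for c in reversed(range(n)):
--         result.extend(data[c * 8:c * 8 + 8])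
--     return result
-- ===== Notes on version B (the rewrite author's own statement) =====
-- stated objective: simpler
-- what changed: Instead of building an intermediate list of 8-element chunks and then reversing it by repeated pop(-1), B computes the chunk count with // and emits the chunks directly in one reverse-order pass over the chunk indices.
import Mathlib
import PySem

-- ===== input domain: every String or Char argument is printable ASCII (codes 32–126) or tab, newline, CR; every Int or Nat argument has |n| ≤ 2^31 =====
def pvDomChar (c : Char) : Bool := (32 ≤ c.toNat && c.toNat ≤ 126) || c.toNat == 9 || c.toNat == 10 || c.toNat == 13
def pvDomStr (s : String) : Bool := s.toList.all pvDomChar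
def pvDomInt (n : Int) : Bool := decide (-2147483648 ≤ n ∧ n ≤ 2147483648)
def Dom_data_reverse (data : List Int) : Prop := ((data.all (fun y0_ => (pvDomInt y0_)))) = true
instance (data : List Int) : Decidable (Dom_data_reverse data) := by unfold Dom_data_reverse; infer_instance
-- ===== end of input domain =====

-- B replaces A's chunk-list-then-pop(-1) reversal by one reverse-order pass over chunk indices (simpler decomposition, same cost).


-- ===== PORT A =====
-- second loop of A: 'for item in range(len(lst)): temp = lst.pop(-1); finalList.extend(temp)'
-- (the 'none' branch of pop? is unreachable: the loop runs exactly len(lst) times)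
def pvPopLoop : Nat → List (List Int) → List Int → (List (List Int) × List Int)
  | 0, lst, fin => (lst, fin)
  | n + 1, lst, fin =>
      match PySem.List.pop? lst (-1) with
      | some (t, rest) => pvPopLoop n rest (fin ++ t)
      | none => (lst, fin)

def data_reverse (data : List Int) : List Int :=
  let l : Int := data.length
  -- first loop: state (s, lst); 'if i != 0: lst.append(data[s:i])'; then 's = i'
  let p := (PySem.List.pyRange 0 (l + 1) 8).foldl
      (fun (st : Int × List (List Int)) i =>
        if i ≠ 0 then (i, st.2 ++ [PySem.List.slice data (some st.1) (some i)])
        else (i, st.2))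
      (0, [])
  (pvPopLoop p.2.length p.2 []).2

-- ===== PORT B =====
def data_reverse_alt (data : List Int) : List Int :=
  let n : Nat := data.length / 8    -- len(data) // 8 (length is non-negative, so // is Nat division)
  ((List.range n).reverse).foldl
    (fun acc (c : Nat) => acc ++ PySem.List.slice data (some ((c : Int) * 8)) (some ((c : Int) * 8 + 8))) []

-- ===== PRECONDITION & SPEC =====
def Spec_data_reverse (data : List Int) (out : List Int) : Prop := out = data_reverse_alt data
instance (data : List Int) (out : List Int) : Decidable (Spec_data_reverse data out) := by unfold Spec_data_reverse; infer_instance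

-- ===== CLAIM (what is proved, stated in full; the proofs are below) =====
def Claim_equal_data_reverse : Prop := ∀ (data : List Int), Dom_data_reverse data → Spec_data_reverse data (data_reverse data)

-- ===== LEMMAS AND PROOFS =====

-- the chunk list A's first loop builds
def pvChunk (data : List Int) (k : Nat) : List Int :=
  PySem.List.slice data (some ((8 * k : Nat) : Int)) (some (((8 * k : Nat) : Int) + 8))

theorem pvFold_range (data : List Int) (m : Nat) :
    (((List.range (m + 1)).map (fun k => ((8 * k : Nat) : Int))).foldl
      (fun (st : Int × List (List Int)) i =>
        if i ≠ 0 then (i, st.2 ++ [PySem.List.slice data (some st.1) (some i)])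
        else (i, st.2))
      (0, []))
    = (((8 * m : Nat) : Int), (List.range m).map (pvChunk data)) := by
  induction m with
  | zero => simp
  | succ m ih =>
    rw [List.range_succ, List.map_append, List.foldl_append, ih]
    have h8 : (((8 * (m + 1) : Nat) : Int)) ≠ 0 := by positivity
    have he : ((8 * (m + 1) : Nat) : Int) = ((8 * m : Nat) : Int) + 8 := by push_cast; ring
    simp only [List.map_cons, List.map_nil, List.foldl_cons, List.foldl_nil,
      List.range_succ, List.map_append, he]
    simp [pvChunk]
    omega

theorem pvPopLoop_spec (lst : List (List Int)) (fin : List Int) :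
    (pvPopLoop lst.length lst fin).2 = fin ++ lst.reverse.flatten := by
  induction lst using List.reverseRecOn generalizing fin with
  | nil => simp [pvPopLoop]
  | append_singleton ys y ih =>
    rw [List.length_append]
    simp only [List.length_singleton, pvPopLoop, PySem.List.pop?_last]
    rw [ih]
    simp

theorem pvRange_eight (l : Nat) :
    PySem.List.pyRange 0 ((l : Int) + 1) 8
      = (List.range (l / 8 + 1)).map (fun k => ((8 * k : Nat) : Int)) := by
  rw [PySem.List.pyRange_of_pos 0 ((l : Int) + 1) (by norm_num)]
  have hc : (((l : Int) + 1 - 0 + 8 - 1) / 8).toNat = l / 8 + 1 := by omega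
  rw [if_pos (by positivity), hc]
  apply List.map_congr_left
  intro k _
  push_cast
  ring

-- ===== VERDICT (by name: the statement is the Claim_ definition above) =====
theorem data_reverse_spec : Claim_equal_data_reverse := by
  intro data _
  unfold Spec_data_reverse data_reverse data_reverse_alt
  simp only []
  rw [pvRange_eight data.length, pvFold_range data (data.length / 8)]
  rw [pvPopLoop_spec]
  rw [PySem.List.foldl_append_eq_flatMap]
  rw [List.nil_append, List.nil_append, List.flatMap_def, ← List.map_reverse]
  congr 1
  apply List.map_congr_left
  intro k _
  unfold pvChunk
  congr 2 <;> · congr 1; push_cast; ring
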